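-- pv_equiv track=rewrite | github.com/miliar/Code_Jam_Webscraper | solutions_python/Problem_155/2269.py | standup
-- ===== SOURCE A (Python) =====
-- def standup(input):
--     friends = 0
--     count = 0
--
--     for index, value in enumerate(input):
--         value = int(value)
--
--         while value > 0 and count < index:
--             friends += 1
--             count += 1
--         count += value
--
--     return friends
-- ===== SOURCE B (Python) =====
-- def standup(input):
--     # Max-deficit formulation: friends = max over positions with positive value
--     # of (index - prefix_sum), clamped at 0; single pass, no inner loop.
--     friends = 0
--     total = 0
--     for index, value in enumerate(input):
--         value = int(value)
--         if value > 0 and index - total > friends: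
--             friends = index - total
--         total += value
--     return friends
-- ===== Notes on version B (the rewrite author's own statement) =====
-- stated objective: simpler
-- what changed: Replaces A's stateful inner while-loop that bumps a running count one friend at a time with a max-of-deficits formulation: friends is the maximum of index - prefix_sum over positions with positive value, maintained in one pass with no inner loop.
import Mathlib
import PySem

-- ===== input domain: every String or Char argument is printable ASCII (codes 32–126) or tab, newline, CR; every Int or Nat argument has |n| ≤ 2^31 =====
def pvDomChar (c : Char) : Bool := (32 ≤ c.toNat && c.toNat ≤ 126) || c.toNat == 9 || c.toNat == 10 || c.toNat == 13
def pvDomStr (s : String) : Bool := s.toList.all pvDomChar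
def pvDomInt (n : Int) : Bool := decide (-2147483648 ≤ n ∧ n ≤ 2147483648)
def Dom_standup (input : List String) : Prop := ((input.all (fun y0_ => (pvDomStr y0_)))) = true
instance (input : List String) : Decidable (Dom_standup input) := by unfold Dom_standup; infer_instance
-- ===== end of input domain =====

-- B replaces A's inner friend-by-friend while-loop with a running max of the deficits
-- index - prefix_sum at positions with positive value (objective: simpler).

-- ===== PORT A =====
-- the inner `while value > 0 and count < index` loop, step for step
def standupWhile (index friends count : Int) (value : Int) : Int × Int :=
  if _h : value > 0 ∧ count < index then
    standupWhile index (friends + 1) (count + 1) value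
  else
    (friends, count)
termination_by (index - count).toNat
decreasing_by omega

-- the outer `for index, value in enumerate(input)` loop; none = ValueError from int(value)
def standupGo (xs : List (Int × String)) (friends count : Int) : Option Int :=
  match xs with
  | [] => some friends
  | (index, s) :: rest =>
    match PySem.Int.ofStr? s with
    | none => none
    | some value =>
      let fc := standupWhile index friends count value
      standupGo rest fc.1 (fc.2 + value)

def standup (input : List String) : Int :=
  (standupGo (PySem.List.enumerate input) 0 0).getD 0

-- ===== PORT B =====
def standupAltGo (xs : List (Int × String)) (friends total : Int) : Option Int :=
  match xs with
  | [] => some friends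
  | (index, s) :: rest =>
    match PySem.Int.ofStr? s with
    | none => none
    | some value =>
      let friends' := if value > 0 ∧ index - total > friends then index - total else friends
      standupAltGo rest friends' (total + value)

def standup_alt (input : List String) : Int :=
  (standupAltGo (PySem.List.enumerate input) 0 0).getD 0

-- ===== PRECONDITION & SPEC =====
-- A raises ValueError when some entry is not a valid Python int literal; exactly those inputs are excluded.
def Pre_standup (input : List String) : Prop :=
  ∀ s ∈ input, (PySem.Int.ofStr? s).isSome

instance (input : List String) : Decidable (Pre_standup input) := by unfold Pre_standup; infer_instance

def pvWitness_standup : List String := ["1", "0", " 2 ", "+1"]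

def Spec_standup (input : List String) (out : Int) : Prop := out = standup_alt input
instance (input : List String) (out : Int) : Decidable (Spec_standup input out) := by unfold Spec_standup; infer_instance

-- ===== CLAIM (what is proved, stated in full; the proofs are below) =====
def Claim_equal_standup : Prop := ∀ (input : List String), Dom_standup input → Pre_standup input → Spec_standup input (standup input)

-- ===== LEMMAS AND PROOFS =====

-- closed form of the inner while-loop
theorem standupWhile_eq_aux (n : Nat) (index friends count value : Int)
    (hn : (index - count).toNat = n) :
    standupWhile index friends count value =
      if value > 0 ∧ count < index then (friends + (index - count), index) else (friends, count) := by
  induction n generalizing friends count with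
  | zero =>
    rw [standupWhile, dif_neg (by omega), if_neg (by omega)]
  | succ n ih =>
    rw [standupWhile]
    by_cases h : value > 0 ∧ count < index
    · rw [dif_pos h, ih (friends + 1) (count + 1) (by omega), if_pos h]
      by_cases h2 : count + 1 < index
      · rw [if_pos ⟨h.1, h2⟩]
        simp only [Prod.mk.injEq]
        exact ⟨by ring, trivial⟩
      · rw [if_neg (by omega)]
        simp only [Prod.mk.injEq]
        have hix : index = count + 1 := by omega
        subst hix
        exact ⟨by ring, rfl⟩
    · rw [dif_neg h, if_neg h]

theorem standupWhile_eq (index friends count value : Int) :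
    standupWhile index friends count value =
      if value > 0 ∧ count < index then (friends + (index - count), index) else (friends, count) :=
  standupWhile_eq_aux (index - count).toNat index friends count value rfl

-- invariant: A's count = B's total + friends; then the two folds agree step for step
theorem go_eq (xs : List (Int × String)) (friends total : Int) :
    standupGo xs friends (total + friends) = standupAltGo xs friends total := by
  induction xs generalizing friends total with
  | nil => rfl
  | cons p rest ih =>
    obtain ⟨index, s⟩ := p
    simp only [standupGo, standupAltGo]
    cases PySem.Int.ofStr? s with
    | none => rfl
    | some value =>
      simp only [standupWhile_eq]
      by_cases h : value > 0 ∧ total + friends < index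
      · rw [if_pos h, if_pos ⟨h.1, by omega⟩]
        have : index + value = (total + value) + (friends + (index - (total + friends))) := by ring
        simp only [this]
        have h2 : friends + (index - (total + friends)) = index - total := by ring
        rw [ih, h2]
      · rw [if_neg h, if_neg (by omega)]
        have : total + friends + value = (total + value) + friends := by ring
        rw [this, ih]

-- ===== VERDICT (by name: the statement is the Claim_ definition above) =====
theorem standup_spec : Claim_equal_standup := by
  intro input _ _
  unfold Spec_standup standup standup_alt
  have h := go_eq (PySem.List.enumerate input) 0 0
  norm_num at h
  rw [h]
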